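-- pv_equiv track=rewrite | github.com/fritz1149/Bishe_2 | preprocess/utils.py | _cut_stats_list
-- ===== SOURCE A (Python) =====
-- def _cut_stats_list(a: list[tuple]):
--     a = sorted(a, key=lambda x: x[0])
--     bins = []
--     for num, cnt in a[:10]:
--         bins.append((num, num, cnt))
--
--     g10_cnt = sum(cnt for _, cnt in a[10:])
--     bin_size = g10_cnt // 10
--     tmp_cnt = None
--     tmp_left = None
--     for num, cnt in a[10:]:
--         if tmp_cnt is None:
--             tmp_left = num
--             tmp_cnt = cnt
--         else:
--             tmp_cnt += cnt
--         if tmp_cnt >= bin_size: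
--             bins.append((tmp_left, num, tmp_cnt))
--             tmp_cnt = None
--             tmp_left = None
--     if tmp_cnt is not None:
--         bins.append((tmp_left, a[-1][0], tmp_cnt))
--     return bins
-- ===== SOURCE B (Python) =====
-- def _split_point(rest, bin_size):
--     # length of the shortest nonempty prefix of rest whose count-sum
--     # reaches bin_size, or len(rest) if none does
--     total = 0
--     for i, (_, c) in enumerate(rest):
--         total += c
--         if total >= bin_size:
--             return i + 1
--     return len(rest)
--
--
-- def _cut_stats_list(a: list[tuple]):
--     s = sorted(a, key=lambda x: x[0])
--     head, tail = s[:10], s[10:]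
--     bin_size = sum(c for _, c in tail) // 10
--
--     # stage 1: partition the tail into a list of chunk sublists, each the
--     # shortest nonempty prefix of the remainder reaching bin_size (the final
--     # chunk may fall short and simply takes everything that is left)
--     chunks = []
--     rest = tail
--     while rest:
--         n = _split_point(rest, bin_size)
--         chunks.append(rest[:n])
--         rest = rest[n:]
--
--     # stage 2: one bin per chunk; a chunk that fell short ends at tail[-1],
--     # which is its own last element, so no leftover special case is needed
--     return [(num, num, cnt) for num, cnt in head] + \
--            [(ch[0][0], ch[-1][0], sum(c for _, c in ch)) for ch in chunks]
-- ===== Notes on version B (the rewrite author's own statement) =====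
-- stated objective: alternative
-- what changed: Instead of A's single pass with a None-sentinel accumulator pair and a leftover patch-up, B first partitions the sorted tail into explicit chunk sublists (repeatedly splitting off the shortest prefix reaching bin_size) and then maps each chunk to a bin; the leftover special case disappears because an unfinished last chunk already ends at tail[-1].
import Mathlib
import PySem

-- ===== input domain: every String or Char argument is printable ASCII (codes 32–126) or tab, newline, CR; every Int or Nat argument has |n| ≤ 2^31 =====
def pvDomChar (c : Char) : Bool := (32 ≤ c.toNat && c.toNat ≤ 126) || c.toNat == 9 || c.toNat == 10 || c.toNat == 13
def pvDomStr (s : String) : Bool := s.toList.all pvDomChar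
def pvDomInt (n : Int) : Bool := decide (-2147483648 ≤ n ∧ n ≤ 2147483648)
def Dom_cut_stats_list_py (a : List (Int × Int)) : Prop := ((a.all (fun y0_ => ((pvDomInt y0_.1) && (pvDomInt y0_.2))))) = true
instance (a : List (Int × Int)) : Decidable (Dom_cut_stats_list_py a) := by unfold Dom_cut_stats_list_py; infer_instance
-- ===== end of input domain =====

-- B partitions the sorted tail into explicit chunk sublists (repeatedly splitting off the
-- shortest prefix reaching bin_size) and then maps each chunk to a bin, instead of A's
-- single sentinel-accumulator pass with a leftover patch-up; objective: alternative decomposition.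


-- ===== PORT A =====
-- loop over a[10:] with the sentinel accumulators tmp_cnt/tmp_left (None = Option.none)
def pvALoop (bin_size : Int) : List (Int × Int) → List (Int × Int × Int) → Option Int → Option Int →
    List (Int × Int × Int) × Option Int × Option Int
  | [], bins, tmp_cnt, tmp_left => (bins, tmp_cnt, tmp_left)
  | (num, cnt) :: rest, bins, tmp_cnt, tmp_left =>
    let tl : Option Int := match tmp_cnt with | none => some num | some _ => tmp_left
    let tc : Int := match tmp_cnt with | none => cnt | some c => c + cnt
    if tc ≥ bin_size then
      -- tmp_left is always `some` here (set together with tmp_cnt); the default 0 is unreachable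
      pvALoop bin_size rest (bins ++ [(tl.getD 0, num, tc)]) none none
    else
      pvALoop bin_size rest bins (some tc) tl

def cut_stats_list_py (a : List (Int × Int)) : List (Int × Int × Int) :=
  let s := PySem.List.sorted a (fun x => x.1)
  let bins := (PySem.List.slice s none (some 10)).foldl (fun bins x => bins ++ [(x.1, x.1, x.2)]) []
  let g10_cnt := ((PySem.List.slice s (some 10) none).map (fun x => x.2)).sum
  let bin_size := PySem.Int.floordiv g10_cnt 10
  let r := pvALoop bin_size (PySem.List.slice s (some 10) none) bins none none
  match r.2.1 with
  | none => r.1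
  | some tc =>
    -- a[-1] exists here: tmp_cnt ≠ None forces a[10:] ≠ []; the defaults are unreachable
    r.1 ++ [(r.2.2.getD 0, ((PySem.List.pyGet? s (-1)).getD (0, 0)).1, tc)]

-- ===== PORT B =====
-- _split_point: running-total scan; i+1 at the first close, len(rest) on fall-through
def pvSplitPoint (bin_size : Int) : List (Int × Int) → Int → Nat
  | [], _ => 0
  | x :: rest, total =>
    if total + x.2 ≥ bin_size then 1 else pvSplitPoint bin_size rest (total + x.2) + 1

-- termination helper for pvChunks, cited in its decreasing_by
theorem pvSplitPoint_pos (bin_size total : Int) (x : Int × Int) (rest : List (Int × Int)) :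
    1 ≤ pvSplitPoint bin_size (x :: rest) total := by
  unfold pvSplitPoint; split <;> omega

-- while rest: n = _split_point(rest, bin_size); chunks.append(rest[:n]); rest = rest[n:]
def pvChunks (bin_size : Int) : List (Int × Int) → List (List (Int × Int))
  | [] => []
  | x :: rest =>
    let n := pvSplitPoint bin_size (x :: rest) 0
    (x :: rest).take n :: pvChunks bin_size ((x :: rest).drop n)
  termination_by t => t.length
  decreasing_by
    have h := pvSplitPoint_pos bin_size 0 x rest
    simp only [List.length_drop, List.length_cons]
    omega

def cut_stats_list_py_alt (a : List (Int × Int)) : List (Int × Int × Int) :=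
  let s := PySem.List.sorted a (fun x => x.1)
  let head := PySem.List.slice s none (some 10)
  let tail := PySem.List.slice s (some 10) none
  let bin_size := PySem.Int.floordiv ((tail.map (fun x => x.2)).sum) 10
  head.map (fun x => (x.1, x.1, x.2)) ++
    (pvChunks bin_size tail).map (fun ch =>
      -- ch[0] / ch[-1]: every chunk is nonempty, so the defaults are unreachable
      ((ch.headD (0, 0)).1, (ch.getLastD (0, 0)).1, (ch.map (fun x => x.2)).sum))

-- ===== PRECONDITION & SPEC =====
def Spec_cut_stats_list_py (a : List (Int × Int)) (out : List (Int × Int × Int)) : Prop := out = cut_stats_list_py_alt a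
instance (a : List (Int × Int)) (out : List (Int × Int × Int)) : Decidable (Spec_cut_stats_list_py a out) := by unfold Spec_cut_stats_list_py; infer_instance

-- ===== CLAIM (what is proved, stated in full; the proofs are below) =====
def Claim_equal_cut_stats_list_py : Prop := ∀ (a : List (Int × Int)), Dom_cut_stats_list_py a → Spec_cut_stats_list_py a (cut_stats_list_py a)

-- ===== LEMMAS AND PROOFS =====

def pvSumC (t : List (Int × Int)) : Int := (t.map (fun x => x.2)).sum

-- index (0-based) at which the running total first reaches bin_size, if any
def pvTake? (bs : Int) : List (Int × Int) → Int → Option Nat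
  | [], _ => none
  | x :: rest, total =>
    if total + x.2 ≥ bs then some 0 else (pvTake? bs rest (total + x.2)).map (· + 1)

theorem pvSplitPoint_eq (bs : Int) : ∀ (t : List (Int × Int)) (tot : Int),
    pvSplitPoint bs t tot = match pvTake? bs t tot with | some i => i + 1 | none => t.length := by
  intro t
  induction t with
  | nil => intro tot; simp [pvSplitPoint, pvTake?]
  | cons x rest ih =>
    intro tot
    simp only [pvSplitPoint, pvTake?]
    split
    · rfl
    · rw [ih]
      cases pvTake? bs rest (tot + x.2) <;> simp

theorem pvTake?_lt (bs : Int) : ∀ (t : List (Int × Int)) (tot : Int) (i : Nat),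
    pvTake? bs t tot = some i → i < t.length := by
  intro t
  induction t with
  | nil => intro tot i h; simp [pvTake?] at h
  | cons x rest ih =>
    intro tot i h
    simp only [pvTake?] at h
    split at h
    · cases h; simp
    · simp only [Option.map_eq_some_iff] at h
      obtain ⟨j, hj, rfl⟩ := h
      have := ih _ _ hj
      simp; omega

theorem pvGetLastD_eq {α : Type} (l : List α) (d : α) : l.getLastD d = (l.getLast?).getD d := by
  cases l using List.reverseRecOn <;> simp

theorem pvLast_drop {α : Type} (xs : List α) (m : Nat) (h : xs.drop m ≠ []) :
    (xs.drop m).getLast? = xs.getLast? := by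
  have hm : m < xs.length := by
    by_contra hc
    exact h (List.drop_eq_nil_of_le (by omega))
  rw [List.getLast?_eq_getElem?, List.getLast?_eq_getElem?, List.getElem?_drop]
  congr 1
  simp
  omega

-- the one-chunk behaviour of A's loop, from a live accumulator state
theorem pvALoop_some (bs : Int) : ∀ (t : List (Int × Int)) (acc left : Int) (bins : List (Int × Int × Int)),
    pvALoop bs t bins (some acc) (some left) =
      match pvTake? bs t acc with
      | some i => pvALoop bs (t.drop (i + 1))
          (bins ++ [(left, (t.getD i (0, 0)).1, acc + pvSumC (t.take (i + 1)))]) none none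
      | none => (bins, some (acc + pvSumC t), some left) := by
  intro t
  induction t with
  | nil => intro acc left bins; simp [pvALoop, pvTake?, pvSumC]
  | cons x rest ih =>
    intro acc left bins
    obtain ⟨num, cnt⟩ := x
    simp only [pvALoop, pvTake?]
    by_cases hc : acc + cnt ≥ bs
    · rw [if_pos hc, if_pos hc]
      simp [pvSumC]
    · rw [if_neg hc, if_neg hc, ih]
      cases h : pvTake? bs rest (acc + cnt) with
      | none => simp [pvSumC]; ring
      | some i =>
        simp only [Option.map_some]
        have : acc + cnt + pvSumC (rest.take (i + 1)) = acc + pvSumC ((num, cnt) :: rest |>.take (i + 1 + 1)) := by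
          simp [pvSumC]; ring
        rw [List.drop_succ_cons]
        simp only [List.getD_cons_succ, List.take_succ_cons]
        congr 2
        simp [pvSumC]
        ring

-- starting the loop on a nonempty list with empty accumulators = starting with (0, head)
theorem pvALoop_start (bs : Int) (x : Int × Int) (rest : List (Int × Int)) (bins : List (Int × Int × Int)) :
    pvALoop bs (x :: rest) bins none none = pvALoop bs (x :: rest) bins (some 0) (some x.1) := by
  obtain ⟨num, cnt⟩ := x
  simp [pvALoop]

-- main invariant: A's loop + leftover patch-up = bins ++ one bin per chunk
theorem pvMain (bs : Int) : ∀ (N : Nat) (t : List (Int × Int)), t.length ≤ N →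
    ∀ (bins : List (Int × Int × Int)) (last : Int),
    (t ≠ [] → last = (t.getLastD (0, 0)).1) →
    (match (pvALoop bs t bins none none).2.1 with
     | none => (pvALoop bs t bins none none).1
     | some tc => (pvALoop bs t bins none none).1 ++
         [((pvALoop bs t bins none none).2.2.getD 0, last, tc)]) =
    bins ++ (pvChunks bs t).map (fun ch =>
      ((ch.headD (0, 0)).1, (ch.getLastD (0, 0)).1, (ch.map (fun x => x.2)).sum)) := by
  intro N
  induction N with
  | zero =>
    intro t ht bins last _
    have : t = [] := List.length_eq_zero_iff.mp (by omega)
    subst this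
    simp [pvALoop, pvChunks]
  | succ N ih =>
    intro t ht bins last hlast
    cases t with
    | nil => simp [pvALoop, pvChunks]
    | cons x rest =>
      rw [pvALoop_start, pvALoop_some]
      have hsp := pvSplitPoint_eq bs (x :: rest) 0
      cases htk : pvTake? bs (x :: rest) 0 with
      | none =>
        -- no chunk closes: one final chunk = the whole remainder
        rw [htk] at hsp
        simp only
        rw [pvChunks, hsp]
        simp only [List.take_length, List.drop_length, pvChunks, List.map_cons, List.map_nil]
        have hlast' := hlast (by simp)
        simp [pvSumC, hlast']
      | some i =>
        rw [htk] at hsp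
        simp only
        have hilt : i < (x :: rest).length := pvTake?_lt bs _ _ _ htk
        -- the emitted bin is the bin of the first chunk
        have hbin : (x.1, ((x :: rest).getD i (0, 0)).1, 0 + pvSumC ((x :: rest).take (i + 1)))
            = (fun ch => ((ch.headD (0, 0)).1, (ch.getLastD (0, 0)).1, (ch.map (fun y => y.2)).sum))
              ((x :: rest).take (i + 1)) := by
          have h2 : (x :: rest.take i).getLast? = (x :: rest)[i]? := by
            have he : x :: rest.take i = (x :: rest).take (i + 1) := rfl
            rw [List.getLast?_eq_getElem?]
            have hlen : (x :: rest.take i).length = i + 1 := by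
              simp only [List.length_cons, List.length_take]
              simp at hilt
              omega
            rw [hlen, Nat.add_sub_cancel, he, List.getElem?_take_of_lt (by omega)]
          simp [pvSumC, h2]
        rw [pvChunks, hsp, hbin]
        have hdln : ((x :: rest).drop (i + 1)).length ≤ N := by
          simp only [List.length_drop]
          simp at ht ⊢
          omega
        have hlast' : (x :: rest).drop (i + 1) ≠ [] →
            last = (((x :: rest).drop (i + 1)).getLastD (0, 0)).1 := by
          intro hne
          rw [pvGetLastD_eq, pvLast_drop _ _ hne, ← pvGetLastD_eq]
          exact hlast (by simp)
        have := ih ((x :: rest).drop (i + 1)) hdln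
          (bins ++ [(fun ch => ((ch.headD (0, 0)).1, (ch.getLastD (0, 0)).1, (ch.map (fun y => y.2)).sum))
            ((x :: rest).take (i + 1))]) last hlast'
        rw [this]
        simp

theorem cut_main (a : List (Int × Int)) : cut_stats_list_py a = cut_stats_list_py_alt a := by
  simp only [cut_stats_list_py, cut_stats_list_py_alt]
  rw [PySem.List.foldl_append_singleton_eq_map]
  simp only [List.nil_append]
  set s := PySem.List.sorted a (fun x => x.1) with hs
  set t := PySem.List.slice s (some 10) none with ht
  have hdrop : t = s.drop 10 := by
    rw [ht]
    simpa using PySem.List.slice_from_natCast s 10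
  have hlast : t ≠ [] → ((PySem.List.pyGet? s (-1)).getD (0, 0)).1 = (t.getLastD (0, 0)).1 := by
    intro hne
    rw [PySem.List.pyGet?_neg_one, pvGetLastD_eq, hdrop]
    rw [pvLast_drop s 10 (hdrop ▸ hne)]
  have := pvMain (PySem.Int.floordiv ((t.map (fun x => x.2)).sum) 10) t.length t (le_refl _)
    ((PySem.List.slice s none (some 10)).map (fun x => (x.1, x.1, x.2)))
    (((PySem.List.pyGet? s (-1)).getD (0, 0)).1) (fun hne => hlast hne)
  exact this

-- ===== VERDICT (by name: the statement is the Claim_ definition above) =====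
theorem cut_stats_list_py_spec : Claim_equal_cut_stats_list_py := by
  intro a _
  exact cut_main a
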